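-- pv_equiv track=rewrite | github.com/pedeveaux/StringStuff | stringstuff.py | count_char_occurances
-- ===== SOURCE A (Python) =====
-- def count_char_occurances(str_in: str) -> dict:
--     """
--     Given an input string, count occurrences of all characters within a string
--     """
--     result = {}
--     compact_str = str_in.replace(" ", "")
--     for ch in compact_str:
--         if ch in result.keys():
--             result[ch] += 1
--         else:
--             result[ch] = 1
--
--     return result
-- ===== SOURCE B (Python) =====
-- def count_char_occurances(str_in: str) -> dict:
--     """
--     Given an input string, count occurrences of all characters within a string
--     """
--     compact_str = str_in.replace(" ", "")
--     return {ch: compact_str.count(ch) for ch in dict.fromkeys(compact_str)}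
-- ===== Notes on version B (the rewrite author's own statement) =====
-- stated objective: simpler
-- what changed: Replaces the single-pass dict-building loop with a two-phase decomposition: dedupe the space-stripped characters in first-appearance order (dict.fromkeys) and build the result with one str.count per distinct character.
import Mathlib
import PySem

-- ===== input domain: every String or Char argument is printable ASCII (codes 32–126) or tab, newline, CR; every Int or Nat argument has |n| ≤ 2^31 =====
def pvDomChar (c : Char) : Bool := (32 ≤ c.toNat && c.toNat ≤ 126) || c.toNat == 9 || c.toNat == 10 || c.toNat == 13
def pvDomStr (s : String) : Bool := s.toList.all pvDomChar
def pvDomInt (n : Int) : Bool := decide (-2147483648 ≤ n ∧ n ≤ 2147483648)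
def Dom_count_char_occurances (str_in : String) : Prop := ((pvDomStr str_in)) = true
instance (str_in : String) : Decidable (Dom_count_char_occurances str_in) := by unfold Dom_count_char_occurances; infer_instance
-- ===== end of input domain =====

-- B builds the same counts by deduplicating the space-stripped characters and counting each
-- distinct character once, instead of A's incremental dict-update loop (objective: simpler).

-- ===== PORT A =====
def count_char_occurances (str_in : String) : List (String × Int) :=
  let compact_str := PySem.Chars.replace str_in.toList [' '] []
  (compact_str.foldl (fun result ch =>
      if result.contains (String.singleton ch) then
        result.insert (String.singleton ch) (result.getD (String.singleton ch) 0 + 1)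
      else
        result.insert (String.singleton ch) 1)
    PySem.Dict.empty).items

-- ===== PORT B =====
def count_char_occurances_alt (str_in : String) : List (String × Int) :=
  let compact_str := PySem.Chars.replace str_in.toList [' '] []
  (PySem.List.dedup compact_str).map
    (fun ch => (String.singleton ch, (compact_str.count ch : Int)))

-- ===== PRECONDITION & SPEC =====
def Spec_count_char_occurances (str_in : String) (out : List (String × Int)) : Prop := out = count_char_occurances_alt str_in
instance (str_in : String) (out : List (String × Int)) : Decidable (Spec_count_char_occurances str_in out) := by unfold Spec_count_char_occurances; infer_instance

-- ===== CLAIM (what is proved, stated in full; the proofs are below) =====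
def Claim_equal_count_char_occurances : Prop := ∀ (str_in : String), Dom_count_char_occurances str_in → Spec_count_char_occurances str_in (count_char_occurances str_in)

-- ===== LEMMAS AND PROOFS =====

theorem pv_singleton_injective : Function.Injective String.singleton := by
  intro a b h
  have : (String.singleton a).toList = (String.singleton b).toList := by rw [h]
  simpa [String.singleton] using this

-- A membership test on a mapped-injectively set commutes with Set.add
theorem pv_add_map (f : Char → String) (hf : Function.Injective f) (s : List Char) (x : Char) :
    PySem.Set.add (s.map f) (f x) = (PySem.Set.add s x).map f := by
  simp [PySem.Set.add, PySem.Set.contains, List.mem_map, hf.eq_iff]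
  split_ifs <;> simp_all

-- first-occurrence dedup commutes with mapping an injective function
theorem pv_ofList_map (f : Char → String) (hf : Function.Injective f) (l : List Char) :
    PySem.Set.ofList (l.map f) = (PySem.List.dedup l).map f := by
  simp only [PySem.List.dedup_eq_ofList]
  have h : ∀ (l : List Char) (s : List Char),
      (l.map f).foldl PySem.Set.add (s.map f) = (l.foldl PySem.Set.add s).map f := by
    intro l
    induction l with
    | nil => intro s; rfl
    | cons c t ih => intro s; simp only [List.map_cons, List.foldl_cons, pv_add_map f hf, ih]
  simpa using h l []

-- A's loop on any character list produces exactly B's dedup-and-count list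
theorem pv_loop_eq (l : List Char) :
    (l.foldl (fun result ch =>
        if result.contains (String.singleton ch) then
          result.insert (String.singleton ch) (result.getD (String.singleton ch) 0 + 1)
        else
          result.insert (String.singleton ch) 1)
      PySem.Dict.empty).items
    = (PySem.List.dedup l).map (fun ch => (String.singleton ch, (l.count ch : Int))) := by
  have hb : ∀ (d : PySem.Dict String Int) (ch : Char), ch ∈ l →
      (if d.contains (String.singleton ch) then
        d.insert (String.singleton ch) (d.getD (String.singleton ch) 0 + 1)
      else
        d.insert (String.singleton ch) 1)
      = d.insert (String.singleton ch) (d.getD (String.singleton ch) 0 + 1) := by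
    intro d ch _
    by_cases h : d.contains (String.singleton ch)
    · simp [h]
    · have h' : d.contains (String.singleton ch) = false := by simpa using h
      rw [if_neg h, PySem.Dict.getD_of_not_contains _ _ h']
      norm_num
  rw [PySem.List.foldl_congr_mem _ _ _ _ hb,
      ← List.foldl_map (f := String.singleton) (g := fun (d : PySem.Dict String Int) k => d.insert k (d.getD k 0 + 1)),
      PySem.Dict.foldl_insert_getD_add_one_eq_counter,
      PySem.Dict.items_counter,
      pv_ofList_map _ pv_singleton_injective, List.map_map]
  simp [Function.comp, List.count_map_of_injective _ _ pv_singleton_injective]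

-- ===== VERDICT (by name: the statement is the Claim_ definition above) =====
theorem count_char_occurances_spec : Claim_equal_count_char_occurances := by
  intro s _
  unfold Spec_count_char_occurances count_char_occurances count_char_occurances_alt
  exact pv_loop_eq _
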